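-- pv_equiv track=rewrite | github.com/DvirAsaf/interview_question_python | Min_Moves_For_Str_Without_3_Identical_Consecutive _Letters.py | min_moves_to_obtain_str_without_3_idebtical_consecutive_letters
-- ===== SOURCE A (Python) =====
-- def min_moves_to_obtain_str_without_3_idebtical_consecutive_letters(s):
--     result = 0
--     size_s = len(s)
--     i = 0
--     while i < size_s:
--         next = i + 1
--
--         while (next < size_s) and (s[i] == s[next]):
--             next += 1
--
--         result += (next - i) // 3
--         i = next
--
--     return result
-- ===== SOURCE B (Python) =====
-- def min_moves_to_obtain_str_without_3_idebtical_consecutive_letters(s):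
--     result = 0
--     n = len(s)
--     i = 0
--     while i + 2 < n:
--         if s[i] == s[i + 1] == s[i + 2]:
--             result += 1
--             i += 3
--         else:
--             i += 1
--     return result
-- ===== Notes on version B (the rewrite author's own statement) =====
-- stated objective: alternative
-- what changed: Replaced A's run-scanning (inner while finds each maximal run, adds run_length // 3) by a sliding three-character window: whenever s[i]==s[i+1]==s[i+2] count one move and jump i by 3, otherwise advance i by 1 - no run lengths, no division, no inner loop.
import Mathlib
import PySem

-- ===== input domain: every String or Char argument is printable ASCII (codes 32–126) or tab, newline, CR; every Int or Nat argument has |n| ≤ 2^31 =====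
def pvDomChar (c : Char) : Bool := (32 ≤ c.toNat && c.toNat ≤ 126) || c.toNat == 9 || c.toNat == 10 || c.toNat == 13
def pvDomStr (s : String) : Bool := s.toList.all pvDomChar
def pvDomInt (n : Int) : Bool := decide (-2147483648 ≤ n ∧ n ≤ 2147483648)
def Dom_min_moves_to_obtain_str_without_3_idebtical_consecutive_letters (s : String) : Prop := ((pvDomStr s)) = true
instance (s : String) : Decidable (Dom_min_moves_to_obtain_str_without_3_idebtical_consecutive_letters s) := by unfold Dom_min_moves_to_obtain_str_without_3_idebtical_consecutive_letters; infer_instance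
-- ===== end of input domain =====

-- B replaces A's run scanning (inner while + run_length // 3) by a sliding three-character
-- window that jumps by 3 on a match (objective: alternative).

-- ===== PORT A =====
-- inner while: `while (next < size_s) and (s[i] == s[next]): next += 1`
def pvANext (l : List Char) (c : Char) (j : Nat) : Nat :=
  if h : j < l.length ∧ l.getD j default = c then
    pvANext l c (j + 1)
  else j
termination_by l.length - j
decreasing_by omega

-- Lemma the outer loop's termination cites: pvANext never moves backwards.
theorem pvANext_ge (l : List Char) (c : Char) (j : Nat) : j ≤ pvANext l c j := by
  unfold pvANext
  split
  · exact Nat.le_trans (Nat.le_succ j) (pvANext_ge l c (j + 1))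
  · exact Nat.le_refl j
termination_by l.length - j
decreasing_by omega

-- outer while: accumulator `result`, index `i`
def pvALoop (l : List Char) (i : Nat) (result : Int) : Int :=
  if _h : i < l.length then
    let next := pvANext l (l.getD i default) (i + 1)
    pvALoop l next (result + PySem.Int.floordiv ((next : Int) - (i : Int)) 3)
  else result
termination_by l.length - i
decreasing_by
  have := pvANext_ge l (l.getD i default) (i + 1)
  omega

def min_moves_to_obtain_str_without_3_idebtical_consecutive_letters (s : String) : Int :=
  pvALoop s.toList 0 0

-- ===== PORT B =====
-- B's while loop: index i, window s[i], s[i+1], s[i+2]; jump by 3 on a triple, else by 1.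
def pvBLoop (l : List Char) (i : Nat) (result : Int) : Int :=
  if _h : i + 2 < l.length then
    if l.getD i default = l.getD (i + 1) default ∧
       l.getD (i + 1) default = l.getD (i + 2) default then
      pvBLoop l (i + 3) (result + 1)
    else
      pvBLoop l (i + 1) result
  else result
termination_by l.length - i
decreasing_by all_goals omega

def min_moves_to_obtain_str_without_3_idebtical_consecutive_letters_alt (s : String) : Int :=
  pvBLoop s.toList 0 0

-- ===== PRECONDITION & SPEC =====
def Spec_min_moves_to_obtain_str_without_3_idebtical_consecutive_letters (s : String) (out : Int) : Prop := out = min_moves_to_obtain_str_without_3_idebtical_consecutive_letters_alt s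
instance (s : String) (out : Int) : Decidable (Spec_min_moves_to_obtain_str_without_3_idebtical_consecutive_letters s out) := by unfold Spec_min_moves_to_obtain_str_without_3_idebtical_consecutive_letters; infer_instance

-- ===== CLAIM (what is proved, stated in full; the proofs are below) =====
def Claim_equal_min_moves_to_obtain_str_without_3_idebtical_consecutive_letters : Prop := ∀ (s : String), Dom_min_moves_to_obtain_str_without_3_idebtical_consecutive_letters s → Spec_min_moves_to_obtain_str_without_3_idebtical_consecutive_letters s (min_moves_to_obtain_str_without_3_idebtical_consecutive_letters s)

-- ===== LEMMAS AND PROOFS =====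

-- length of the leading run of `c` in a list
def pvLead (c : Char) : List Char → Nat
  | [] => 0
  | x :: t => if x = c then pvLead c t + 1 else 0

-- what remains after that leading run
def pvAfter (c : Char) : List Char → List Char
  | [] => []
  | x :: t => if x = c then pvAfter c t else x :: t

theorem pvAfter_length_le (c : Char) (l : List Char) : (pvAfter c l).length ≤ l.length := by
  induction l with
  | nil => simp [pvAfter]
  | cons x t ih =>
    simp only [pvAfter]
    split
    · exact Nat.le_trans ih (Nat.le_succ _)
    · exact Nat.le_refl _

-- reference value: sum over runs of ⌊len/3⌋
def pvRuns : List Char → Int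
  | [] => 0
  | c :: t => (((1 + pvLead c t) / 3 : Nat) : Int) + pvRuns (pvAfter c t)
termination_by l => l.length
decreasing_by
  have := pvAfter_length_le c t
  simp only [List.length_cons]
  omega

theorem pvLead_le (c : Char) (l : List Char) : pvLead c l ≤ l.length := by
  induction l with
  | nil => simp [pvLead]
  | cons x t ih =>
    simp only [pvLead]
    split
    · simpa using ih
    · simp

-- A's inner while computes j + the leading-run length of the dropped suffix
theorem pvANext_eq (l : List Char) (c : Char) (j : Nat) (hj : j ≤ l.length) :
    pvANext l c j = j + pvLead c (l.drop j) := by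
  by_cases h : j < l.length
  · have hd : l.drop j = l[j] :: l.drop (j + 1) := List.drop_eq_getElem_cons h
    by_cases he : l.getD j default = c
    · rw [pvANext]
      simp only [h, he, and_self, dif_pos]
      have := pvANext_eq l c (j + 1) (by omega)
      rw [this, hd]
      have hge : l[j] = c := by rwa [List.getD_eq_getElem l default h] at he
      simp [pvLead, hge]
      omega
    · rw [pvANext]
      simp only [he, and_false, dif_neg, not_false_iff]
      rw [hd]
      have hne : ¬ (l[j] = c) := by rwa [List.getD_eq_getElem l default h] at he
      simp [pvLead, hne]
  · have : j = l.length := by omega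
    subst this
    rw [pvANext]
    simp [pvLead]
termination_by l.length - j
decreasing_by omega

-- dropping past the leading run equals pvAfter
theorem drop_pvAfter (l : List Char) (c : Char) (j : Nat) (hj : j ≤ l.length) :
    l.drop (j + pvLead c (l.drop j)) = pvAfter c (l.drop j) := by
  by_cases h : j < l.length
  · have hd : l.drop j = l[j] :: l.drop (j + 1) := List.drop_eq_getElem_cons h
    by_cases he : l[j] = c
    · rw [hd]
      simp only [pvLead, pvAfter, he, if_pos]
      have := drop_pvAfter l c (j + 1) (by omega)
      rw [← this]
      congr 1
      omega
    · rw [hd]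
      simp [pvLead, pvAfter, he]
  · have : j = l.length := by omega
    subst this
    simp [pvLead, pvAfter]
termination_by l.length - j
decreasing_by omega

-- A's outer loop sums run contributions of the remaining suffix
theorem pvALoop_eq (l : List Char) (i : Nat) (r : Int) (hi : i ≤ l.length) :
    pvALoop l i r = r + pvRuns (l.drop i) := by
  by_cases h : i < l.length
  · rw [pvALoop]
    simp only [h, dif_pos]
    have hd : l.drop i = l[i] :: l.drop (i + 1) := List.drop_eq_getElem_cons h
    have hg : l.getD i default = l[i] := List.getD_eq_getElem l default h
    have hnext : pvANext l (l.getD i default) (i + 1) = (i + 1) + pvLead l[i] (l.drop (i + 1)) := by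
      rw [hg]; exact pvANext_eq l l[i] (i + 1) (by omega)
    set L := pvLead l[i] (l.drop (i + 1)) with hL
    have hLlen : L ≤ l.length - (i + 1) := by
      have := pvLead_le l[i] (l.drop (i + 1))
      simpa [hL] using this
    have hle : (i + 1) + L ≤ l.length := by omega
    have hrec := pvALoop_eq l ((i + 1) + L) (r + PySem.Int.floordiv (((i + 1) + L : Nat) - (i : Nat)) 3) hle
    rw [hnext]
    rw [hrec]
    have hdropA : l.drop ((i + 1) + L) = pvAfter l[i] (l.drop (i + 1)) := by
      have := drop_pvAfter l l[i] (i + 1) (by omega)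
      rw [← this, hL]
    rw [hdropA]
    have hdiv : PySem.Int.floordiv (((i + 1) + L : Nat) - (i : Nat)) 3 = (((1 + L) / 3 : Nat) : Int) := by
      have h1 : (((i + 1) + L : Nat) : Int) - (i : Nat) = ((1 + L : Nat) : Int) := by push_cast; ring
      rw [h1]
      exact_mod_cast PySem.Int.floordiv_natCast (1 + L) 3
    rw [hdiv]
    conv_rhs => rw [hd, pvRuns]
    ring
  · have : i = l.length := by omega
    subst this
    rw [pvALoop]
    simp [pvRuns]
termination_by l.length - i
decreasing_by omega

-- list-level version of B's loop: look at the first three characters, jump by 3 or by 1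
def pvB : List Char → Int
  | a :: b :: c :: t => if a = b ∧ b = c then 1 + pvB t else pvB (b :: c :: t)
  | _ => 0
termination_by l => l.length
decreasing_by all_goals (simp only [List.length_cons]; omega)

-- stripping any leading run of c from t costs exactly ⌊lead/3⌋ of pvRuns
theorem pvRuns_strip (c : Char) (t : List Char) :
    pvRuns t = ((pvLead c t / 3 : Nat) : Int) + pvRuns (pvAfter c t) := by
  cases t with
  | nil => simp [pvLead, pvAfter, pvRuns]
  | cons x t' =>
    by_cases hx : x = c
    · subst hx
      rw [pvRuns]
      simp [pvLead, pvAfter, Nat.add_comm]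
    · simp [pvLead, pvAfter, hx]

-- the window scan computes the per-run sum of ⌊len/3⌋
theorem pvB_eq (l : List Char) : pvB l = pvRuns l := by
  match l with
  | [] => simp [pvB, pvRuns]
  | [a] => simp [pvB, pvRuns, pvLead, pvAfter]
  | [a, b] =>
    by_cases hab : b = a
    · subst hab
      simp [pvB, pvRuns, pvLead, pvAfter]
    · simp [pvB, pvRuns, pvLead, pvAfter, hab]
  | a :: b :: c :: t =>
    rw [pvB]
    by_cases htr : a = b ∧ b = c
    · obtain ⟨h1, h2⟩ := htr
      subst h1; subst h2
      rw [if_pos ⟨rfl, rfl⟩, pvB_eq t, pvRuns_strip a t]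
      conv_rhs => rw [pvRuns]
      have hL : pvLead a (a :: a :: t) = pvLead a t + 1 + 1 := by
        simp [pvLead]
      have hA : pvAfter a (a :: a :: t) = pvAfter a t := by
        simp [pvAfter]
      rw [hL, hA]
      have h3 : (1 + (pvLead a t + 1 + 1)) / 3 = 1 + pvLead a t / 3 := by omega
      rw [h3]
      push_cast
      ring
    · rw [if_neg htr, pvB_eq (b :: c :: t)]
      by_cases hab : b = a
      · subst hab
        have hbc : ¬ c = b := fun h => htr ⟨rfl, h.symm⟩
        conv_lhs => rw [pvRuns]
        conv_rhs => rw [pvRuns]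
        simp [pvLead, pvAfter, hbc]
      · conv_rhs => rw [pvRuns]
        simp [pvLead, pvAfter, hab]

-- B's index loop follows pvB on the remaining suffix
theorem pvBLoop_eq (l : List Char) (i : Nat) (r : Int) :
    pvBLoop l i r = r + pvB (l.drop i) := by
  rw [pvBLoop]
  by_cases h : i + 2 < l.length
  · have h0 : i < l.length := by omega
    have h1 : i + 1 < l.length := by omega
    have hd0 : l.drop i = l[i] :: l.drop (i + 1) := List.drop_eq_getElem_cons h0
    have hd1 : l.drop (i + 1) = l[i + 1] :: l.drop (i + 2) := List.drop_eq_getElem_cons h1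
    have hd2 : l.drop (i + 2) = l[i + 2] :: l.drop (i + 3) := List.drop_eq_getElem_cons h
    have hg0 : l.getD i default = l[i] := List.getD_eq_getElem l default h0
    have hg1 : l.getD (i + 1) default = l[i + 1] := List.getD_eq_getElem l default h1
    have hg2 : l.getD (i + 2) default = l[i + 2] := List.getD_eq_getElem l default h
    simp only [h, dif_pos, hg0, hg1, hg2]
    rw [hd0, hd1, hd2, pvB]
    split
    · rw [pvBLoop_eq l (i + 3) (r + 1)]
      ring
    · rw [pvBLoop_eq l (i + 1) r, hd1, hd2]
  · simp only [h, dif_neg, not_false_iff]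
    have : pvB (l.drop i) = 0 := by
      have hlen : (l.drop i).length ≤ 2 := by
        simp [List.length_drop]; omega
      match hm : l.drop i with
      | [] => simp [pvB]
      | [a] => simp [pvB]
      | [a, b] => simp [pvB]
      | a :: b :: c :: t => rw [hm] at hlen; simp at hlen
    rw [this]
    ring
termination_by l.length - i
decreasing_by all_goals omega

-- ===== VERDICT (by name: the statement is the Claim_ definition above) =====
theorem min_moves_to_obtain_str_without_3_idebtical_consecutive_letters_spec : Claim_equal_min_moves_to_obtain_str_without_3_idebtical_consecutive_letters := by
  intro s _
  unfold Spec_min_moves_to_obtain_str_without_3_idebtical_consecutive_letters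
  unfold min_moves_to_obtain_str_without_3_idebtical_consecutive_letters
  unfold min_moves_to_obtain_str_without_3_idebtical_consecutive_letters_alt
  rw [pvALoop_eq s.toList 0 0 (by omega), pvBLoop_eq, pvB_eq]
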